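-- pv_equiv track=rewrite | github.com/srujan1466/ESP_MESH_MONITORING_NETWORK | server/app.py | classify_metric
-- ===== SOURCE A (Python) =====
-- THRESHOLDS = {
--     'air_quality': {
--         'green': (0, 50),       # Good
--         'yellow': (50, 100),    # Moderate
--         'orange': (100, 200),   # Unhealthy for sensitive
--         'red': (200, 5000),     # Hazardous
--     },
--     'noise': {
--         'green': (0, 55),       # Acceptable
--         'yellow': (55, 70),     # Moderate
--         'orange': (70, 85),     # Loud
--         'red': (85, 140),       # Dangerous
--     },
--     'temperature': {
--         'green': (15, 30),
--         'yellow': (30, 40),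
--         'orange': (40, 50),
--         'red': (50, 100),
--     }
-- }
--
-- def classify_metric(metric_name, value):
--     """Classify a single metric into a zone."""
--     if value is None or value < -900:
--         return 'green'
--     thresholds = THRESHOLDS.get(metric_name, {})
--     for z in ['red', 'orange', 'yellow', 'green']:
--         if z in thresholds:
--             low, high = thresholds[z]
--             if low <= value < high:
--                 return z
--     if value >= thresholds.get('red', (0, 0))[0]:
--         return 'red'
--     return 'green'
-- ===== SOURCE B (Python) =====
-- import bisect
--
-- # Per-metric bands as parallel sorted arrays: lows, highs, zones (ascending severity).
-- _BANDS = {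
--     'air_quality': ([0, 50, 100, 200], [50, 100, 200, 5000], ['green', 'yellow', 'orange', 'red']),
--     'noise': ([0, 55, 70, 85], [55, 70, 85, 140], ['green', 'yellow', 'orange', 'red']),
--     'temperature': ([15, 30, 40, 50], [30, 40, 50, 100], ['green', 'yellow', 'orange', 'red']),
-- }
--
-- def classify_metric(metric_name, value):
--     """Classify a single metric into a zone."""
--     if value is None or value < -900:
--         return 'green'
--     bands = _BANDS.get(metric_name)
--     if bands is not None:
--         lows, highs, zones = bands
--         i = bisect.bisect_right(highs, value)
--         if i < len(zones) and lows[i] <= value: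
--             return zones[i]
--         red_low = lows[-1]
--     else:
--         red_low = 0
--     return 'red' if value >= red_low else 'green'
-- ===== Notes on version B (the rewrite author's own statement) =====
-- stated objective: alternative
-- what changed: Replaces the linear scan over a dict of (low,high) zone tuples with parallel sorted boundary arrays and a single bisect_right lookup that picks the containing band directly, with one shared underflow/overflow fallback line.
import Mathlib
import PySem

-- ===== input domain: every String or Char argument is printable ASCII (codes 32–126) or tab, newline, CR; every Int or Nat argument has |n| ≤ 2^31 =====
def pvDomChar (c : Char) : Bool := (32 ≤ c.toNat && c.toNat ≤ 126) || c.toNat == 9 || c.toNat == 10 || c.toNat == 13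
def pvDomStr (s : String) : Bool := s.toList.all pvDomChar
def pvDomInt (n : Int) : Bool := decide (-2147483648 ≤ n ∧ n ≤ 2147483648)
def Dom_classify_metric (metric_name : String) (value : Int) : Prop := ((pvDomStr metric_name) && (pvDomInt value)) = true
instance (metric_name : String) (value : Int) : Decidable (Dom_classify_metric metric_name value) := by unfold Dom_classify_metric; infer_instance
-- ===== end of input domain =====

-- B replaces A's linear scan over a dict of zone tuples with a bisect_right lookup in
-- parallel sorted boundary arrays (alternative structure; same observable behaviour).


-- ===== PORT A =====
def pvAirT : PySem.Dict String (Int × Int) :=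
  PySem.Dict.ofList [("green", (0, 50)), ("yellow", (50, 100)), ("orange", (100, 200)), ("red", (200, 5000))]
def pvNoiseT : PySem.Dict String (Int × Int) :=
  PySem.Dict.ofList [("green", (0, 55)), ("yellow", (55, 70)), ("orange", (70, 85)), ("red", (85, 140))]
def pvTempT : PySem.Dict String (Int × Int) :=
  PySem.Dict.ofList [("green", (15, 30)), ("yellow", (30, 40)), ("orange", (40, 50)), ("red", (50, 100))]
def pyTHRESHOLDS : PySem.Dict String (PySem.Dict String (Int × Int)) :=
  PySem.Dict.ofList [("air_quality", pvAirT), ("noise", pvNoiseT), ("temperature", pvTempT)]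

-- value is an Int here, so Python's 'value is None' guard is always False in the port.
def classify_metric (metric_name : String) (value : Int) : String :=
  if value < -900 then "green"
  else
    let thresholds := (pyTHRESHOLDS.get? metric_name).getD PySem.Dict.empty
    let found := ["red", "orange", "yellow", "green"].foldl
      (fun (acc : Option String) (z : String) =>
        match acc with
        | some r => some r
        | none =>
          if thresholds.contains z then
            match thresholds.get? z with
            | some lh => if lh.1 ≤ value ∧ value < lh.2 then some z else none
            | none => none
          else none) none
    match found with
    | some z => z
    | none => if value ≥ (thresholds.getD "red" (0, 0)).1 then "red" else "green"

-- ===== PORT B =====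
def pvBANDS : PySem.Dict String (List Int × List Int × List String) :=
  PySem.Dict.ofList
    [("air_quality", ([0, 50, 100, 200], [50, 100, 200, 5000], ["green", "yellow", "orange", "red"])),
     ("noise", ([0, 55, 70, 85], [55, 70, 85, 140], ["green", "yellow", "orange", "red"])),
     ("temperature", ([15, 30, 40, 50], [30, 40, 50, 100], ["green", "yellow", "orange", "red"]))]

def classify_metric_alt (metric_name : String) (value : Int) : String :=
  if value < -900 then "green"
  else
    match pvBANDS.get? metric_name with
    | some (lows, highs, zones) =>
      let i := PySem.List.bisectRight highs value
      if i < zones.length ∧ lows.getD i 0 ≤ value then zones.getD i "green"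
      else if value ≥ lows.getD (lows.length - 1) 0 then "red" else "green"
    | none => if value ≥ 0 then "red" else "green"

-- ===== PRECONDITION & SPEC =====
def Spec_classify_metric (metric_name : String) (value : Int) (out : String) : Prop := out = classify_metric_alt metric_name value
instance (metric_name : String) (value : Int) (out : String) : Decidable (Spec_classify_metric metric_name value out) := by unfold Spec_classify_metric; infer_instance

-- ===== CLAIM (what is proved, stated in full; the proofs are below) =====
def Claim_equal_classify_metric : Prop := ∀ (metric_name : String) (value : Int), Dom_classify_metric metric_name value → Spec_classify_metric metric_name value (classify_metric metric_name value)

-- ===== LEMMAS AND PROOFS =====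

-- bisect_right is the unique j with everything before index j ≤ v and everything from j on > v.
theorem pv_bisectRight_eq_of (xs : List Int) (v : Int) (hs : List.Pairwise (· ≤ ·) xs)
    (j : Nat) (hj : j ≤ xs.length)
    (h1 : ∀ i (hi : i < xs.length), i < j → xs[i] ≤ v)
    (h2 : ∀ i (hi : i < xs.length), j ≤ i → v < xs[i]) :
    PySem.List.bisectRight xs v = j := by
  obtain ⟨hle, hA, hB⟩ := PySem.List.bisectRight_spec xs v hs
  set b := PySem.List.bisectRight xs v with hb
  rcases lt_trichotomy b j with h | h | h
  · have hblen : b < xs.length := lt_of_lt_of_le h hj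
    have := h1 b hblen h
    have := hB b hblen (le_refl b)
    omega
  · exact h
  · have hjlen : j < xs.length := lt_of_lt_of_le h hle
    have := h2 j hjlen (le_refl j)
    have := hA j hjlen h
    omega

-- closed form of bisect_right on a sorted four-element list
theorem pv_bisect4 (a b c d v : Int) (hab : a ≤ b) (hbc : b ≤ c) (hcd : c ≤ d) :
    PySem.List.bisectRight [a, b, c, d] v =
      if v < a then 0 else if v < b then 1 else if v < c then 2 else if v < d then 3 else 4 := by
  have hs : List.Pairwise (· ≤ ·) ([a, b, c, d] : List Int) := by
    simp [List.pairwise_cons]; omega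
  split_ifs with h1 h2 h3 h4 <;>
    refine pv_bisectRight_eq_of _ _ hs _ (by simp) ?_ ?_ <;>
    (intro i hi hij; simp only [List.length_cons, List.length_nil] at hi;
     interval_cases i <;> simp <;> omega)

theorem pv_thr_air : pyTHRESHOLDS.get? "air_quality" = some pvAirT := by decide

theorem pv_bands_air : pvBANDS.get? "air_quality" = some (([0, 50, 100, 200] : List Int), ([50, 100, 200, 5000] : List Int), (["green", "yellow", "orange", "red"] : List String)) := by decide

theorem pv_air_c0 : pvAirT.contains "green" = true := by decide

theorem pv_air_g0 : pvAirT.get? "green" = some ((0, 50) : Int × Int) := by decide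

theorem pv_air_c1 : pvAirT.contains "yellow" = true := by decide

theorem pv_air_g1 : pvAirT.get? "yellow" = some ((50, 100) : Int × Int) := by decide

theorem pv_air_c2 : pvAirT.contains "orange" = true := by decide

theorem pv_air_g2 : pvAirT.get? "orange" = some ((100, 200) : Int × Int) := by decide

theorem pv_air_c3 : pvAirT.contains "red" = true := by decide

theorem pv_air_g3 : pvAirT.get? "red" = some ((200, 5000) : Int × Int) := by decide

theorem pv_air_gd : pvAirT.getD "red" (0, 0) = ((200, 5000) : Int × Int) := by decide

theorem pv_case_air (v : Int) (hlow : ¬ v < -900) :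
    classify_metric "air_quality" v = classify_metric_alt "air_quality" v := by
  rcases (by omega : (v < 0) ∨ (0 ≤ v ∧ v < 50) ∨ (50 ≤ v ∧ v < 100) ∨ (100 ≤ v ∧ v < 200) ∨ (200 ≤ v ∧ v < 5000) ∨ (5000 ≤ v)) with h | h | h | h | h | h
  · have hb : PySem.List.bisectRight ([50, 100, 200, 5000] : List Int) v = 0 := by
      rw [pv_bisect4 _ _ _ _ _ (by omega) (by omega) (by omega)]; split_ifs <;> omega
    simp [classify_metric, classify_metric_alt, pv_thr_air, pv_bands_air,
      pv_air_c0, pv_air_c1, pv_air_c2, pv_air_c3,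
      pv_air_g0, pv_air_g1, pv_air_g2, pv_air_g3, pv_air_gd, hb, hlow,
      eq_true (by omega : v < (0:Int)),
      eq_false (by omega : ¬(0:Int) ≤ v),
      eq_true (by omega : v < (50:Int)),
      eq_false (by omega : ¬(50:Int) ≤ v),
      eq_true (by omega : v < (100:Int)),
      eq_false (by omega : ¬(100:Int) ≤ v),
      eq_true (by omega : v < (200:Int)),
      eq_false (by omega : ¬(200:Int) ≤ v),
      eq_true (by omega : v < (5000:Int)),
      eq_false (by omega : ¬(5000:Int) ≤ v)]
  · have hb : PySem.List.bisectRight ([50, 100, 200, 5000] : List Int) v = 0 := by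
      rw [pv_bisect4 _ _ _ _ _ (by omega) (by omega) (by omega)]; split_ifs <;> omega
    simp [classify_metric, classify_metric_alt, pv_thr_air, pv_bands_air,
      pv_air_c0, pv_air_c1, pv_air_c2, pv_air_c3,
      pv_air_g0, pv_air_g1, pv_air_g2, pv_air_g3, pv_air_gd, hb, hlow,
      eq_false (by omega : ¬ v < (0:Int)),
      eq_true (by omega : (0:Int) ≤ v),
      eq_true (by omega : v < (50:Int)),
      eq_false (by omega : ¬(50:Int) ≤ v),
      eq_true (by omega : v < (100:Int)),
      eq_false (by omega : ¬(100:Int) ≤ v),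
      eq_true (by omega : v < (200:Int)),
      eq_false (by omega : ¬(200:Int) ≤ v),
      eq_true (by omega : v < (5000:Int)),
      eq_false (by omega : ¬(5000:Int) ≤ v)]
  · have hb : PySem.List.bisectRight ([50, 100, 200, 5000] : List Int) v = 1 := by
      rw [pv_bisect4 _ _ _ _ _ (by omega) (by omega) (by omega)]; split_ifs <;> omega
    simp [classify_metric, classify_metric_alt, pv_thr_air, pv_bands_air,
      pv_air_c0, pv_air_c1, pv_air_c2, pv_air_c3,
      pv_air_g0, pv_air_g1, pv_air_g2, pv_air_g3, pv_air_gd, hb, hlow,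
      eq_false (by omega : ¬ v < (0:Int)),
      eq_true (by omega : (0:Int) ≤ v),
      eq_false (by omega : ¬ v < (50:Int)),
      eq_true (by omega : (50:Int) ≤ v),
      eq_true (by omega : v < (100:Int)),
      eq_false (by omega : ¬(100:Int) ≤ v),
      eq_true (by omega : v < (200:Int)),
      eq_false (by omega : ¬(200:Int) ≤ v),
      eq_true (by omega : v < (5000:Int)),
      eq_false (by omega : ¬(5000:Int) ≤ v)]
  · have hb : PySem.List.bisectRight ([50, 100, 200, 5000] : List Int) v = 2 := by
      rw [pv_bisect4 _ _ _ _ _ (by omega) (by omega) (by omega)]; split_ifs <;> omega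
    simp [classify_metric, classify_metric_alt, pv_thr_air, pv_bands_air,
      pv_air_c0, pv_air_c1, pv_air_c2, pv_air_c3,
      pv_air_g0, pv_air_g1, pv_air_g2, pv_air_g3, pv_air_gd, hb, hlow,
      eq_false (by omega : ¬ v < (0:Int)),
      eq_true (by omega : (0:Int) ≤ v),
      eq_false (by omega : ¬ v < (50:Int)),
      eq_true (by omega : (50:Int) ≤ v),
      eq_false (by omega : ¬ v < (100:Int)),
      eq_true (by omega : (100:Int) ≤ v),
      eq_true (by omega : v < (200:Int)),
      eq_false (by omega : ¬(200:Int) ≤ v),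
      eq_true (by omega : v < (5000:Int)),
      eq_false (by omega : ¬(5000:Int) ≤ v)]
  · have hb : PySem.List.bisectRight ([50, 100, 200, 5000] : List Int) v = 3 := by
      rw [pv_bisect4 _ _ _ _ _ (by omega) (by omega) (by omega)]; split_ifs <;> omega
    simp [classify_metric, classify_metric_alt, pv_thr_air, pv_bands_air,
      pv_air_c0, pv_air_c1, pv_air_c2, pv_air_c3,
      pv_air_g0, pv_air_g1, pv_air_g2, pv_air_g3, pv_air_gd, hb, hlow,
      eq_false (by omega : ¬ v < (0:Int)),
      eq_true (by omega : (0:Int) ≤ v),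
      eq_false (by omega : ¬ v < (50:Int)),
      eq_true (by omega : (50:Int) ≤ v),
      eq_false (by omega : ¬ v < (100:Int)),
      eq_true (by omega : (100:Int) ≤ v),
      eq_false (by omega : ¬ v < (200:Int)),
      eq_true (by omega : (200:Int) ≤ v),
      eq_true (by omega : v < (5000:Int)),
      eq_false (by omega : ¬(5000:Int) ≤ v)]
  · have hb : PySem.List.bisectRight ([50, 100, 200, 5000] : List Int) v = 4 := by
      rw [pv_bisect4 _ _ _ _ _ (by omega) (by omega) (by omega)]; split_ifs <;> omega
    simp [classify_metric, classify_metric_alt, pv_thr_air, pv_bands_air,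
      pv_air_c0, pv_air_c1, pv_air_c2, pv_air_c3,
      pv_air_g0, pv_air_g1, pv_air_g2, pv_air_g3, pv_air_gd, hb, hlow,
      eq_false (by omega : ¬ v < (0:Int)),
      eq_true (by omega : (0:Int) ≤ v),
      eq_false (by omega : ¬ v < (50:Int)),
      eq_true (by omega : (50:Int) ≤ v),
      eq_false (by omega : ¬ v < (100:Int)),
      eq_true (by omega : (100:Int) ≤ v),
      eq_false (by omega : ¬ v < (200:Int)),
      eq_true (by omega : (200:Int) ≤ v),
      eq_false (by omega : ¬ v < (5000:Int)),
      eq_true (by omega : (5000:Int) ≤ v)]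

theorem pv_thr_noise : pyTHRESHOLDS.get? "noise" = some pvNoiseT := by decide

theorem pv_bands_noise : pvBANDS.get? "noise" = some (([0, 55, 70, 85] : List Int), ([55, 70, 85, 140] : List Int), (["green", "yellow", "orange", "red"] : List String)) := by decide

theorem pv_noise_c0 : pvNoiseT.contains "green" = true := by decide

theorem pv_noise_g0 : pvNoiseT.get? "green" = some ((0, 55) : Int × Int) := by decide

theorem pv_noise_c1 : pvNoiseT.contains "yellow" = true := by decide

theorem pv_noise_g1 : pvNoiseT.get? "yellow" = some ((55, 70) : Int × Int) := by decide

theorem pv_noise_c2 : pvNoiseT.contains "orange" = true := by decide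

theorem pv_noise_g2 : pvNoiseT.get? "orange" = some ((70, 85) : Int × Int) := by decide

theorem pv_noise_c3 : pvNoiseT.contains "red" = true := by decide

theorem pv_noise_g3 : pvNoiseT.get? "red" = some ((85, 140) : Int × Int) := by decide

theorem pv_noise_gd : pvNoiseT.getD "red" (0, 0) = ((85, 140) : Int × Int) := by decide

theorem pv_case_noise (v : Int) (hlow : ¬ v < -900) :
    classify_metric "noise" v = classify_metric_alt "noise" v := by
  rcases (by omega : (v < 0) ∨ (0 ≤ v ∧ v < 55) ∨ (55 ≤ v ∧ v < 70) ∨ (70 ≤ v ∧ v < 85) ∨ (85 ≤ v ∧ v < 140) ∨ (140 ≤ v)) with h | h | h | h | h | h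
  · have hb : PySem.List.bisectRight ([55, 70, 85, 140] : List Int) v = 0 := by
      rw [pv_bisect4 _ _ _ _ _ (by omega) (by omega) (by omega)]; split_ifs <;> omega
    simp [classify_metric, classify_metric_alt, pv_thr_noise, pv_bands_noise,
      pv_noise_c0, pv_noise_c1, pv_noise_c2, pv_noise_c3,
      pv_noise_g0, pv_noise_g1, pv_noise_g2, pv_noise_g3, pv_noise_gd, hb, hlow,
      eq_true (by omega : v < (0:Int)),
      eq_false (by omega : ¬(0:Int) ≤ v),
      eq_true (by omega : v < (55:Int)),
      eq_false (by omega : ¬(55:Int) ≤ v),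
      eq_true (by omega : v < (70:Int)),
      eq_false (by omega : ¬(70:Int) ≤ v),
      eq_true (by omega : v < (85:Int)),
      eq_false (by omega : ¬(85:Int) ≤ v),
      eq_true (by omega : v < (140:Int)),
      eq_false (by omega : ¬(140:Int) ≤ v)]
  · have hb : PySem.List.bisectRight ([55, 70, 85, 140] : List Int) v = 0 := by
      rw [pv_bisect4 _ _ _ _ _ (by omega) (by omega) (by omega)]; split_ifs <;> omega
    simp [classify_metric, classify_metric_alt, pv_thr_noise, pv_bands_noise,
      pv_noise_c0, pv_noise_c1, pv_noise_c2, pv_noise_c3,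
      pv_noise_g0, pv_noise_g1, pv_noise_g2, pv_noise_g3, pv_noise_gd, hb, hlow,
      eq_false (by omega : ¬ v < (0:Int)),
      eq_true (by omega : (0:Int) ≤ v),
      eq_true (by omega : v < (55:Int)),
      eq_false (by omega : ¬(55:Int) ≤ v),
      eq_true (by omega : v < (70:Int)),
      eq_false (by omega : ¬(70:Int) ≤ v),
      eq_true (by omega : v < (85:Int)),
      eq_false (by omega : ¬(85:Int) ≤ v),
      eq_true (by omega : v < (140:Int)),
      eq_false (by omega : ¬(140:Int) ≤ v)]
  · have hb : PySem.List.bisectRight ([55, 70, 85, 140] : List Int) v = 1 := by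
      rw [pv_bisect4 _ _ _ _ _ (by omega) (by omega) (by omega)]; split_ifs <;> omega
    simp [classify_metric, classify_metric_alt, pv_thr_noise, pv_bands_noise,
      pv_noise_c0, pv_noise_c1, pv_noise_c2, pv_noise_c3,
      pv_noise_g0, pv_noise_g1, pv_noise_g2, pv_noise_g3, pv_noise_gd, hb, hlow,
      eq_false (by omega : ¬ v < (0:Int)),
      eq_true (by omega : (0:Int) ≤ v),
      eq_false (by omega : ¬ v < (55:Int)),
      eq_true (by omega : (55:Int) ≤ v),
      eq_true (by omega : v < (70:Int)),
      eq_false (by omega : ¬(70:Int) ≤ v),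
      eq_true (by omega : v < (85:Int)),
      eq_false (by omega : ¬(85:Int) ≤ v),
      eq_true (by omega : v < (140:Int)),
      eq_false (by omega : ¬(140:Int) ≤ v)]
  · have hb : PySem.List.bisectRight ([55, 70, 85, 140] : List Int) v = 2 := by
      rw [pv_bisect4 _ _ _ _ _ (by omega) (by omega) (by omega)]; split_ifs <;> omega
    simp [classify_metric, classify_metric_alt, pv_thr_noise, pv_bands_noise,
      pv_noise_c0, pv_noise_c1, pv_noise_c2, pv_noise_c3,
      pv_noise_g0, pv_noise_g1, pv_noise_g2, pv_noise_g3, pv_noise_gd, hb, hlow,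
      eq_false (by omega : ¬ v < (0:Int)),
      eq_true (by omega : (0:Int) ≤ v),
      eq_false (by omega : ¬ v < (55:Int)),
      eq_true (by omega : (55:Int) ≤ v),
      eq_false (by omega : ¬ v < (70:Int)),
      eq_true (by omega : (70:Int) ≤ v),
      eq_true (by omega : v < (85:Int)),
      eq_false (by omega : ¬(85:Int) ≤ v),
      eq_true (by omega : v < (140:Int)),
      eq_false (by omega : ¬(140:Int) ≤ v)]
  · have hb : PySem.List.bisectRight ([55, 70, 85, 140] : List Int) v = 3 := by
      rw [pv_bisect4 _ _ _ _ _ (by omega) (by omega) (by omega)]; split_ifs <;> omega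
    simp [classify_metric, classify_metric_alt, pv_thr_noise, pv_bands_noise,
      pv_noise_c0, pv_noise_c1, pv_noise_c2, pv_noise_c3,
      pv_noise_g0, pv_noise_g1, pv_noise_g2, pv_noise_g3, pv_noise_gd, hb, hlow,
      eq_false (by omega : ¬ v < (0:Int)),
      eq_true (by omega : (0:Int) ≤ v),
      eq_false (by omega : ¬ v < (55:Int)),
      eq_true (by omega : (55:Int) ≤ v),
      eq_false (by omega : ¬ v < (70:Int)),
      eq_true (by omega : (70:Int) ≤ v),
      eq_false (by omega : ¬ v < (85:Int)),
      eq_true (by omega : (85:Int) ≤ v),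
      eq_true (by omega : v < (140:Int)),
      eq_false (by omega : ¬(140:Int) ≤ v)]
  · have hb : PySem.List.bisectRight ([55, 70, 85, 140] : List Int) v = 4 := by
      rw [pv_bisect4 _ _ _ _ _ (by omega) (by omega) (by omega)]; split_ifs <;> omega
    simp [classify_metric, classify_metric_alt, pv_thr_noise, pv_bands_noise,
      pv_noise_c0, pv_noise_c1, pv_noise_c2, pv_noise_c3,
      pv_noise_g0, pv_noise_g1, pv_noise_g2, pv_noise_g3, pv_noise_gd, hb, hlow,
      eq_false (by omega : ¬ v < (0:Int)),
      eq_true (by omega : (0:Int) ≤ v),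
      eq_false (by omega : ¬ v < (55:Int)),
      eq_true (by omega : (55:Int) ≤ v),
      eq_false (by omega : ¬ v < (70:Int)),
      eq_true (by omega : (70:Int) ≤ v),
      eq_false (by omega : ¬ v < (85:Int)),
      eq_true (by omega : (85:Int) ≤ v),
      eq_false (by omega : ¬ v < (140:Int)),
      eq_true (by omega : (140:Int) ≤ v)]

theorem pv_thr_temp : pyTHRESHOLDS.get? "temperature" = some pvTempT := by decide

theorem pv_bands_temp : pvBANDS.get? "temperature" = some (([15, 30, 40, 50] : List Int), ([30, 40, 50, 100] : List Int), (["green", "yellow", "orange", "red"] : List String)) := by decide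

theorem pv_temp_c0 : pvTempT.contains "green" = true := by decide

theorem pv_temp_g0 : pvTempT.get? "green" = some ((15, 30) : Int × Int) := by decide

theorem pv_temp_c1 : pvTempT.contains "yellow" = true := by decide

theorem pv_temp_g1 : pvTempT.get? "yellow" = some ((30, 40) : Int × Int) := by decide

theorem pv_temp_c2 : pvTempT.contains "orange" = true := by decide

theorem pv_temp_g2 : pvTempT.get? "orange" = some ((40, 50) : Int × Int) := by decide

theorem pv_temp_c3 : pvTempT.contains "red" = true := by decide

theorem pv_temp_g3 : pvTempT.get? "red" = some ((50, 100) : Int × Int) := by decide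

theorem pv_temp_gd : pvTempT.getD "red" (0, 0) = ((50, 100) : Int × Int) := by decide

theorem pv_case_temp (v : Int) (hlow : ¬ v < -900) :
    classify_metric "temperature" v = classify_metric_alt "temperature" v := by
  rcases (by omega : (v < 15) ∨ (15 ≤ v ∧ v < 30) ∨ (30 ≤ v ∧ v < 40) ∨ (40 ≤ v ∧ v < 50) ∨ (50 ≤ v ∧ v < 100) ∨ (100 ≤ v)) with h | h | h | h | h | h
  · have hb : PySem.List.bisectRight ([30, 40, 50, 100] : List Int) v = 0 := by
      rw [pv_bisect4 _ _ _ _ _ (by omega) (by omega) (by omega)]; split_ifs <;> omega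
    simp [classify_metric, classify_metric_alt, pv_thr_temp, pv_bands_temp,
      pv_temp_c0, pv_temp_c1, pv_temp_c2, pv_temp_c3,
      pv_temp_g0, pv_temp_g1, pv_temp_g2, pv_temp_g3, pv_temp_gd, hb, hlow,
      eq_true (by omega : v < (15:Int)),
      eq_false (by omega : ¬(15:Int) ≤ v),
      eq_true (by omega : v < (30:Int)),
      eq_false (by omega : ¬(30:Int) ≤ v),
      eq_true (by omega : v < (40:Int)),
      eq_false (by omega : ¬(40:Int) ≤ v),
      eq_true (by omega : v < (50:Int)),
      eq_false (by omega : ¬(50:Int) ≤ v),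
      eq_true (by omega : v < (100:Int)),
      eq_false (by omega : ¬(100:Int) ≤ v)]
  · have hb : PySem.List.bisectRight ([30, 40, 50, 100] : List Int) v = 0 := by
      rw [pv_bisect4 _ _ _ _ _ (by omega) (by omega) (by omega)]; split_ifs <;> omega
    simp [classify_metric, classify_metric_alt, pv_thr_temp, pv_bands_temp,
      pv_temp_c0, pv_temp_c1, pv_temp_c2, pv_temp_c3,
      pv_temp_g0, pv_temp_g1, pv_temp_g2, pv_temp_g3, pv_temp_gd, hb, hlow,
      eq_false (by omega : ¬ v < (15:Int)),
      eq_true (by omega : (15:Int) ≤ v),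
      eq_true (by omega : v < (30:Int)),
      eq_false (by omega : ¬(30:Int) ≤ v),
      eq_true (by omega : v < (40:Int)),
      eq_false (by omega : ¬(40:Int) ≤ v),
      eq_true (by omega : v < (50:Int)),
      eq_false (by omega : ¬(50:Int) ≤ v),
      eq_true (by omega : v < (100:Int)),
      eq_false (by omega : ¬(100:Int) ≤ v)]
  · have hb : PySem.List.bisectRight ([30, 40, 50, 100] : List Int) v = 1 := by
      rw [pv_bisect4 _ _ _ _ _ (by omega) (by omega) (by omega)]; split_ifs <;> omega
    simp [classify_metric, classify_metric_alt, pv_thr_temp, pv_bands_temp,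
      pv_temp_c0, pv_temp_c1, pv_temp_c2, pv_temp_c3,
      pv_temp_g0, pv_temp_g1, pv_temp_g2, pv_temp_g3, pv_temp_gd, hb, hlow,
      eq_false (by omega : ¬ v < (15:Int)),
      eq_true (by omega : (15:Int) ≤ v),
      eq_false (by omega : ¬ v < (30:Int)),
      eq_true (by omega : (30:Int) ≤ v),
      eq_true (by omega : v < (40:Int)),
      eq_false (by omega : ¬(40:Int) ≤ v),
      eq_true (by omega : v < (50:Int)),
      eq_false (by omega : ¬(50:Int) ≤ v),
      eq_true (by omega : v < (100:Int)),
      eq_false (by omega : ¬(100:Int) ≤ v)]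
  · have hb : PySem.List.bisectRight ([30, 40, 50, 100] : List Int) v = 2 := by
      rw [pv_bisect4 _ _ _ _ _ (by omega) (by omega) (by omega)]; split_ifs <;> omega
    simp [classify_metric, classify_metric_alt, pv_thr_temp, pv_bands_temp,
      pv_temp_c0, pv_temp_c1, pv_temp_c2, pv_temp_c3,
      pv_temp_g0, pv_temp_g1, pv_temp_g2, pv_temp_g3, pv_temp_gd, hb, hlow,
      eq_false (by omega : ¬ v < (15:Int)),
      eq_true (by omega : (15:Int) ≤ v),
      eq_false (by omega : ¬ v < (30:Int)),
      eq_true (by omega : (30:Int) ≤ v),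
      eq_false (by omega : ¬ v < (40:Int)),
      eq_true (by omega : (40:Int) ≤ v),
      eq_true (by omega : v < (50:Int)),
      eq_false (by omega : ¬(50:Int) ≤ v),
      eq_true (by omega : v < (100:Int)),
      eq_false (by omega : ¬(100:Int) ≤ v)]
  · have hb : PySem.List.bisectRight ([30, 40, 50, 100] : List Int) v = 3 := by
      rw [pv_bisect4 _ _ _ _ _ (by omega) (by omega) (by omega)]; split_ifs <;> omega
    simp [classify_metric, classify_metric_alt, pv_thr_temp, pv_bands_temp,
      pv_temp_c0, pv_temp_c1, pv_temp_c2, pv_temp_c3,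
      pv_temp_g0, pv_temp_g1, pv_temp_g2, pv_temp_g3, pv_temp_gd, hb, hlow,
      eq_false (by omega : ¬ v < (15:Int)),
      eq_true (by omega : (15:Int) ≤ v),
      eq_false (by omega : ¬ v < (30:Int)),
      eq_true (by omega : (30:Int) ≤ v),
      eq_false (by omega : ¬ v < (40:Int)),
      eq_true (by omega : (40:Int) ≤ v),
      eq_false (by omega : ¬ v < (50:Int)),
      eq_true (by omega : (50:Int) ≤ v),
      eq_true (by omega : v < (100:Int)),
      eq_false (by omega : ¬(100:Int) ≤ v)]
  · have hb : PySem.List.bisectRight ([30, 40, 50, 100] : List Int) v = 4 := by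
      rw [pv_bisect4 _ _ _ _ _ (by omega) (by omega) (by omega)]; split_ifs <;> omega
    simp [classify_metric, classify_metric_alt, pv_thr_temp, pv_bands_temp,
      pv_temp_c0, pv_temp_c1, pv_temp_c2, pv_temp_c3,
      pv_temp_g0, pv_temp_g1, pv_temp_g2, pv_temp_g3, pv_temp_gd, hb, hlow,
      eq_false (by omega : ¬ v < (15:Int)),
      eq_true (by omega : (15:Int) ≤ v),
      eq_false (by omega : ¬ v < (30:Int)),
      eq_true (by omega : (30:Int) ≤ v),
      eq_false (by omega : ¬ v < (40:Int)),
      eq_true (by omega : (40:Int) ≤ v),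
      eq_false (by omega : ¬ v < (50:Int)),
      eq_true (by omega : (50:Int) ≤ v),
      eq_false (by omega : ¬ v < (100:Int)),
      eq_true (by omega : (100:Int) ≤ v)]

theorem pv_get?_none (m : String) (h1 : m ≠ "air_quality") (h2 : m ≠ "noise")
    (h3 : m ≠ "temperature") : pyTHRESHOLDS.get? m = none := by
  rw [show pyTHRESHOLDS = PySem.Dict.mk [("air_quality", pvAirT), ("noise", pvNoiseT),
      ("temperature", pvTempT)] from by decide]
  simp [PySem.Dict.get?_mk_cons, beq_iff_eq, Ne.symm h1, Ne.symm h2, Ne.symm h3, PySem.Dict.get?]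

theorem pv_bands_other (m : String) (h1 : m ≠ "air_quality") (h2 : m ≠ "noise")
    (h3 : m ≠ "temperature") : pvBANDS.get? m = none := by
  rw [show pvBANDS = PySem.Dict.mk
      [("air_quality", ([0, 50, 100, 200], [50, 100, 200, 5000], ["green", "yellow", "orange", "red"])),
       ("noise", ([0, 55, 70, 85], [55, 70, 85, 140], ["green", "yellow", "orange", "red"])),
       ("temperature", ([15, 30, 40, 50], [30, 40, 50, 100], ["green", "yellow", "orange", "red"]))]
      from by decide]
  simp [PySem.Dict.get?_mk_cons, beq_iff_eq, Ne.symm h1, Ne.symm h2, Ne.symm h3, PySem.Dict.get?]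

-- ===== VERDICT (by name: the statement is the Claim_ definition above) =====
theorem classify_metric_spec : Claim_equal_classify_metric := by
  intro m v _
  unfold Spec_classify_metric
  by_cases hlow : v < -900
  · simp [classify_metric, classify_metric_alt, hlow]
  · by_cases h1 : m = "air_quality"
    · subst h1; exact pv_case_air v hlow
    · by_cases h2 : m = "noise"
      · subst h2; exact pv_case_noise v hlow
      · by_cases h3 : m = "temperature"
        · subst h3; exact pv_case_temp v hlow
        · have e1 : (PySem.Dict.empty : PySem.Dict String (Int × Int)).contains "red" = false := by decide
          have e2 : (PySem.Dict.empty : PySem.Dict String (Int × Int)).contains "orange" = false := by decide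
          have e3 : (PySem.Dict.empty : PySem.Dict String (Int × Int)).contains "yellow" = false := by decide
          have e4 : (PySem.Dict.empty : PySem.Dict String (Int × Int)).contains "green" = false := by decide
          have egd : (PySem.Dict.empty : PySem.Dict String (Int × Int)).getD "red" (0, 0) = (0, 0) := by decide
          simp [classify_metric, classify_metric_alt, pv_get?_none m h1 h2 h3,
            pv_bands_other m h1 h2 h3, e1, e2, e3, e4, egd, hlow]
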